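-- pv_equiv track=rewrite | github.com/fawnsung/dpl | dpl/gateway/gateway.py | distribute_data_to_nodes
-- ===== SOURCE A (Python) =====
-- def distribute_data_to_nodes(indexed_data: list, available_nodes: list) -> list:
--     """
--     Average distribute data to available nodes
--     返回: [(node_config, assigned_data), ...]
--     """
--     num_nodes = len(available_nodes)
--     num_items = len(indexed_data)
--     items_per_node = num_items // num_nodes
--     remainder = num_items % num_nodes
--
--     assignments = []
--     start_idx = 0
--
--     for i, node_config in enumerate(available_nodes):
--         # The first few nodes get one extra item (to handle the remainder)
--         node_items = items_per_node + (1 if i < remainder else 0)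
--         end_idx = start_idx + node_items
--
--         assigned_data = indexed_data[start_idx:end_idx]
--         assignments.append((node_config, assigned_data))
--
--         start_idx = end_idx
--
--     return assignments
-- ===== SOURCE B (Python) =====
-- def distribute_data_to_nodes(indexed_data: list, available_nodes: list) -> list:
--     """
--     Average distribute data to available nodes
--     返回: [(node_config, assigned_data), ...]
--     """
--     q, r = divmod(len(indexed_data), len(available_nodes))
--     return [
--         (node_config, indexed_data[i * q + min(i, r):(i + 1) * q + min(i + 1, r)])
--         for i, node_config in enumerate(available_nodes)
--     ]
-- ===== Notes on version B (the rewrite author's own statement) =====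
-- stated objective: alternative
-- what changed: Replaces the running start_idx accumulator loop with a single comprehension whose slice boundaries are computed independently per index from the closed form i*q + min(i, r).
import Mathlib
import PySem

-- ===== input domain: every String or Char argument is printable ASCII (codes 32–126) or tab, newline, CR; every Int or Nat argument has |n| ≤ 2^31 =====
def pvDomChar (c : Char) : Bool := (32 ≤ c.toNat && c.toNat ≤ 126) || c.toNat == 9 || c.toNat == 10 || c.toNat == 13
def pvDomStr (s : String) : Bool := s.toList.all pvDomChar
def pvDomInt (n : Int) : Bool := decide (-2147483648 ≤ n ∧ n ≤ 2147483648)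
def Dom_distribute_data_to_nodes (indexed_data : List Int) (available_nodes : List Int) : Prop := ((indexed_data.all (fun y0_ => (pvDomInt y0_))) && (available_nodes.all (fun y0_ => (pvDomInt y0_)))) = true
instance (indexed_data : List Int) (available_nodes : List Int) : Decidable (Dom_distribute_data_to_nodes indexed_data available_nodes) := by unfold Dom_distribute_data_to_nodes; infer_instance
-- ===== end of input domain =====

-- B replaces A's carried start_idx accumulator with independent closed-form slice
-- boundaries i*q + min(i, r); equivalence of return values is proved below.

-- ===== PORT A =====
-- the for-loop over enumerate(available_nodes) carrying start_idx
def pvALoop (d : List Int) (q r : Int) : List Int → Int → Int → List (Int × List Int)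
  | [], _, _ => []
  | node :: rest, i, start =>
      let node_items := q + (if i < r then 1 else 0)
      let end_idx := start + node_items
      (node, PySem.List.slice d (some start) (some end_idx)) :: pvALoop d q r rest (i + 1) end_idx

def distribute_data_to_nodes (indexed_data : List Int) (available_nodes : List Int) : List (Int × List Int) :=
  let num_nodes : Int := available_nodes.length
  let num_items : Int := indexed_data.length
  let items_per_node := PySem.Int.floordiv num_items num_nodes
  let remainder := PySem.Int.mod num_items num_nodes
  pvALoop indexed_data items_per_node remainder available_nodes 0 0

-- ===== PORT B =====
-- the comprehension: each slice's bounds computed from i alone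
def pvBMap (d : List Int) (q r : Int) : List Int → Int → List (Int × List Int)
  | [], _ => []
  | node :: rest, i =>
      (node, PySem.List.slice d (some (i * q + min i r)) (some ((i + 1) * q + min (i + 1) r)))
        :: pvBMap d q r rest (i + 1)

def distribute_data_to_nodes_alt (indexed_data : List Int) (available_nodes : List Int) : List (Int × List Int) :=
  let q := PySem.Int.floordiv indexed_data.length available_nodes.length
  let r := PySem.Int.mod indexed_data.length available_nodes.length
  pvBMap indexed_data q r available_nodes 0

-- ===== PRECONDITION & SPEC =====
-- Pre_ excludes exactly the inputs where both Pythons raise ZeroDivisionError: an empty node list.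
def Pre_distribute_data_to_nodes (_indexed_data : List Int) (available_nodes : List Int) : Prop := available_nodes ≠ []
instance (indexed_data : List Int) (available_nodes : List Int) : Decidable (Pre_distribute_data_to_nodes indexed_data available_nodes) := by unfold Pre_distribute_data_to_nodes; infer_instance
def pvWitness_distribute_data_to_nodes : List Int × List Int := ([1, 2, 3, 4, 5], [10, 20])

def Spec_distribute_data_to_nodes (indexed_data : List Int) (available_nodes : List Int) (out : List (Int × List Int)) : Prop := out = distribute_data_to_nodes_alt indexed_data available_nodes
instance (indexed_data : List Int) (available_nodes : List Int) (out : List (Int × List Int)) : Decidable (Spec_distribute_data_to_nodes indexed_data available_nodes out) := by unfold Spec_distribute_data_to_nodes; infer_instance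

-- ===== CLAIM (what is proved, stated in full; the proofs are below) =====
def Claim_equal_distribute_data_to_nodes : Prop := ∀ (indexed_data : List Int) (available_nodes : List Int), Dom_distribute_data_to_nodes indexed_data available_nodes → Pre_distribute_data_to_nodes indexed_data available_nodes → Spec_distribute_data_to_nodes indexed_data available_nodes (distribute_data_to_nodes indexed_data available_nodes)

-- ===== LEMMAS AND PROOFS =====
-- A's running start_idx at step i equals the closed form i*q + min i r.
lemma pvLoop_eq (d : List Int) (q r : Int) :
    ∀ (l : List Int) (i : Int),
      pvALoop d q r l i (i * q + min i r) = pvBMap d q r l i := by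
  intro l
  induction l with
  | nil => intro i; rfl
  | cons node rest ih =>
      intro i
      have hstep : i * q + min i r + (q + (if i < r then 1 else 0))
          = (i + 1) * q + min (i + 1) r := by
        have h : (i + 1) * q = i * q + q := by ring
        rw [h]; split_ifs with hc <;> omega
      simp only [pvALoop, pvBMap]
      rw [hstep, ih (i + 1)]

theorem distribute_data_to_nodes_spec : Claim_equal_distribute_data_to_nodes := by
  intro d ns _ hpre
  unfold Spec_distribute_data_to_nodes distribute_data_to_nodes distribute_data_to_nodes_alt
  have hpos : (0 : Int) < (ns.length : Int) := by
    cases ns with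
    | nil => exact absurd rfl hpre
    | cons a l => simp
  have hr : 0 ≤ PySem.Int.mod (d.length : Int) (ns.length : Int) :=
    PySem.Int.mod_nonneg _ hpos
  have h := pvLoop_eq d (PySem.Int.floordiv (d.length : Int) (ns.length : Int))
      (PySem.Int.mod (d.length : Int) (ns.length : Int)) ns 0
  simpa [min_eq_left hr] using h
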